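-- pv_equiv track=rewrite | github.com/pacslab/SSSO-AutoSecMng. | SSSO/manage/__init__.py | evaluate_env_security_level
-- ===== SOURCE A (Python) =====
-- def evaluate_env_security_level(env_active_threat_list):
--     N_TL1 = len(set([item[1] for item in env_active_threat_list if item[2]==1]))
--     N_TL2 = len(set([item[1] for item in env_active_threat_list if item[2]==2]))
--     N_TL3 = len(set([item[1] for item in env_active_threat_list if item[2]==3]))
--     N_TL4 = len(set([item[1] for item in env_active_threat_list if item[2]==4]))
--     if N_TL1>=4:
--         N_TL2 += 1
--     if N_TL2>=3:
--         N_TL3 += 1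
--     if N_TL3>=2:
--         N_TL4 += 1
--     if N_TL4!=0:
--         Threat_Level = 4
--     elif N_TL3!=0:
--         Threat_Level = 3
--     elif N_TL2!=0:
--         Threat_Level = 2
--     elif N_TL1!=0:
--         Threat_Level = 1
--     else:
--         Threat_Level = 0
--     New_Security_Level = 4 - Threat_Level
--     return New_Security_Level
-- ===== SOURCE B (Python) =====
-- def evaluate_env_security_level(env_active_threat_list):
--     # Sort the (level, id) pairs once; equal pairs become adjacent, so one
--     # linear scan counting pairs that differ from their predecessor yields the
--     # number of DISTINCT ids per level -- no hash sets at all.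
--     pairs = sorted((item[2], item[1]) for item in env_active_threat_list
--                    if 1 <= item[2] <= 4)
--     n = [0] * 5
--     prev = None
--     for p in pairs:
--         if p != prev:
--             n[p[0]] += 1
--             prev = p
--     if n[1] >= 4:
--         n[2] += 1
--     if n[2] >= 3:
--         n[3] += 1
--     if n[3] >= 2:
--         n[4] += 1
--     threat_level = next((k for k in (4, 3, 2, 1) if n[k] != 0), 0)
--     return 4 - threat_level
-- ===== Notes on version B (the rewrite author's own statement) =====
-- stated objective: alternative
-- what changed: Replaces the four hash-set comprehensions with a sort-then-scan: one lexicographic sort of (level, id) pairs followed by a single adjacent-dedup scan that counts distinct ids per level with no sets at all; the cascade and selection are unchanged.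
import Mathlib
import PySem

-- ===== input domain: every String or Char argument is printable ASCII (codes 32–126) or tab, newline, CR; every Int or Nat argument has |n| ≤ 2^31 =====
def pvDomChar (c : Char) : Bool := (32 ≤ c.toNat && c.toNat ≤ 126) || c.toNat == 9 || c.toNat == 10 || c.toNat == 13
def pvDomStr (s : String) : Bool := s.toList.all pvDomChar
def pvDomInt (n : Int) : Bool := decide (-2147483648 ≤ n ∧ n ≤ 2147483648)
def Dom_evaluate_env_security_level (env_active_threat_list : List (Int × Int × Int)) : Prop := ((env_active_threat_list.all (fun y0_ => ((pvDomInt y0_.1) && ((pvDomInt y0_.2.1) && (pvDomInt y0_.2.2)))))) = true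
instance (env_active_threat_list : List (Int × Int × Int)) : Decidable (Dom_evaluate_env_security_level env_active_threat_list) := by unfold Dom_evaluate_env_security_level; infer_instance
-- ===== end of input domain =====

-- B replaces A's four hash-set comprehensions by one lexicographic sort of the (level, id)
-- pairs plus one adjacent-dedup scan that counts distinct ids per level (alternative, not faster).

-- ===== PORT A =====
def evaluate_env_security_level (env_active_threat_list : List (Int × Int × Int)) : Int :=
  let N_TL1 : Int := PySem.Set.len (PySem.Set.ofList ((env_active_threat_list.filter (fun item => item.2.2 == 1)).map (fun item => item.2.1)))
  let N_TL2 : Int := PySem.Set.len (PySem.Set.ofList ((env_active_threat_list.filter (fun item => item.2.2 == 2)).map (fun item => item.2.1)))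
  let N_TL3 : Int := PySem.Set.len (PySem.Set.ofList ((env_active_threat_list.filter (fun item => item.2.2 == 3)).map (fun item => item.2.1)))
  let N_TL4 : Int := PySem.Set.len (PySem.Set.ofList ((env_active_threat_list.filter (fun item => item.2.2 == 4)).map (fun item => item.2.1)))
  let N_TL2 := if N_TL1 ≥ 4 then N_TL2 + 1 else N_TL2
  let N_TL3 := if N_TL2 ≥ 3 then N_TL3 + 1 else N_TL3
  let N_TL4 := if N_TL3 ≥ 2 then N_TL4 + 1 else N_TL4
  let Threat_Level : Int :=
    if N_TL4 ≠ 0 then 4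
    else if N_TL3 ≠ 0 then 3
    else if N_TL2 ≠ 0 then 2
    else if N_TL1 ≠ 0 then 1
    else 0
  4 - Threat_Level

-- ===== PORT B =====
-- Source B's 'n[p[0]] += 1' (p[0] is 1..4 after the filter); n[0] of the Python 5-slot list is never touched,
-- so the counters are the 4-tuple (n[1], n[2], n[3], n[4])
def pvBump (n : Int × Int × Int × Int) (k : Int) : Int × Int × Int × Int :=
  if k == 1 then (n.1 + 1, n.2.1, n.2.2.1, n.2.2.2)
  else if k == 2 then (n.1, n.2.1 + 1, n.2.2.1, n.2.2.2)
  else if k == 3 then (n.1, n.2.1, n.2.2.1 + 1, n.2.2.2)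
  else if k == 4 then (n.1, n.2.1, n.2.2.1, n.2.2.2 + 1)
  else n

-- the loop body 'if p != prev: n[p[0]] += 1; prev = p'; state = (prev, counters)
def pvScanStep (st : Option (Int × Int) × Int × Int × Int × Int) (p : Int × Int) :
    Option (Int × Int) × Int × Int × Int × Int :=
  if some p ≠ st.1 then (some p, pvBump st.2 p.1) else st

def evaluate_env_security_level_alt (env_active_threat_list : List (Int × Int × Int)) : Int :=
  let pairs := PySem.List.sorted2
    ((env_active_threat_list.filter (fun item => decide (1 ≤ item.2.2) && decide (item.2.2 ≤ 4))).map
      (fun item => (item.2.2, item.2.1)))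
    Prod.fst Prod.snd
  let st := pairs.foldl pvScanStep (none, (0, 0, 0, 0))
  let n1 : Int := st.2.1
  let n2 : Int := if n1 ≥ 4 then st.2.2.1 + 1 else st.2.2.1
  let n3 : Int := if n2 ≥ 3 then st.2.2.2.1 + 1 else st.2.2.2.1
  let n4 : Int := if n3 ≥ 2 then st.2.2.2.2 + 1 else st.2.2.2.2
  let threat_level : Int :=
    if n4 ≠ 0 then 4
    else if n3 ≠ 0 then 3
    else if n2 ≠ 0 then 2
    else if n1 ≠ 0 then 1
    else 0
  4 - threat_level

-- ===== PRECONDITION & SPEC =====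
def Spec_evaluate_env_security_level (env_active_threat_list : List (Int × Int × Int)) (out : Int) : Prop := out = evaluate_env_security_level_alt env_active_threat_list
instance (env_active_threat_list : List (Int × Int × Int)) (out : Int) : Decidable (Spec_evaluate_env_security_level env_active_threat_list out) := by unfold Spec_evaluate_env_security_level; infer_instance

-- ===== CLAIM (what is proved, stated in full; the proofs are below) =====
def Claim_equal_evaluate_env_security_level : Prop := ∀ (env_active_threat_list : List (Int × Int × Int)), Dom_evaluate_env_security_level env_active_threat_list → Spec_evaluate_env_security_level env_active_threat_list (evaluate_env_security_level env_active_threat_list)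

-- ===== LEMMAS AND PROOFS =====

-- number of pairs of level k, and adding the per-level counts of a list to the counters
def pvCnt (k : Int) (xs : List (Int × Int)) : Int := (xs.countP (fun p => p.1 == k) : Int)
def pvAddCnt (n : Int × Int × Int × Int) (xs : List (Int × Int)) : Int × Int × Int × Int :=
  (n.1 + pvCnt 1 xs, n.2.1 + pvCnt 2 xs, n.2.2.1 + pvCnt 3 xs, n.2.2.2 + pvCnt 4 xs)

theorem pvAddCnt_nil (n : Int × Int × Int × Int) : pvAddCnt n [] = n := by
  simp [pvAddCnt, pvCnt]

theorem pvBump_cnt (n : Int × Int × Int × Int) (a : Int × Int) (t : List (Int × Int)) :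
    pvAddCnt (pvBump n a.1) t = pvAddCnt n (a :: t) := by
  by_cases h1 : a.1 = 1 <;> by_cases h2 : a.1 = 2 <;> by_cases h3 : a.1 = 3 <;> by_cases h4 : a.1 = 4 <;>
    simp_all [pvBump, pvAddCnt, pvCnt] <;> ring

theorem pvDestutter'_head (l : List (Int × Int)) (a : Int × Int) :
    List.destutter' (· ≠ ·) a l = a :: (List.destutter' (· ≠ ·) a l).tail := by
  induction l generalizing a with
  | nil => simp [List.destutter'_nil]
  | cons b l ih =>
    by_cases h : a ≠ b
    · rw [List.destutter'_cons_pos (h := h)]; simp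
    · rw [List.destutter'_cons_neg (h := h)]; exact ih a

theorem pvScan_some (l : List (Int × Int)) (q : Int × Int) (n : Int × Int × Int × Int) :
    (l.foldl pvScanStep (some q, n)).2 = pvAddCnt n (List.destutter' (· ≠ ·) q l).tail := by
  induction l generalizing q n with
  | nil => simp [List.destutter'_nil, pvAddCnt_nil]
  | cons a l ih =>
    by_cases h : a = q
    · subst h
      have hstep : pvScanStep (some a, n) a = (some a, n) := by simp [pvScanStep]
      rw [List.foldl_cons, hstep, ih, List.destutter'_cons_neg (h := by simp)]
    · have hstep : pvScanStep (some q, n) a = (some a, pvBump n a.1) := by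
        simp only [pvScanStep]; rw [if_pos (by simp [h])]
      rw [List.foldl_cons, hstep, ih, pvBump_cnt,
        List.destutter'_cons_pos (h := by exact fun he => h he.symm)]
      rw [List.tail_cons, ← pvDestutter'_head]

theorem pvScan_none (s : List (Int × Int)) (n : Int × Int × Int × Int) :
    (s.foldl pvScanStep (none, n)).2 = pvAddCnt n (s.destutter (· ≠ ·)) := by
  cases s with
  | nil => simp [List.destutter_nil, pvAddCnt_nil]
  | cons p rest =>
    have hstep : pvScanStep (none, n) p = (some p, pvBump n p.1) := by simp [pvScanStep]
    rw [List.foldl_cons, hstep, pvScan_some, pvBump_cnt, List.destutter_cons',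
      pvDestutter'_head rest p, List.tail_cons]

-- sorted2 with fst/snd keys sorts by the lexicographic order on the pairs
theorem pvSorted2_eq_sorted_toLex (xs : List (Int × Int)) :
    PySem.List.sorted2 xs Prod.fst Prod.snd =
      PySem.List.sorted xs (fun p => (toLex p : Int ×ₗ Int)) false := by
  have hbe : (fun a b : Int × Int => decide (a.1 < b.1) || (!decide (b.1 < a.1) && decide (a.2 < b.2)))
      = (fun a b : Int × Int => decide ((toLex a : Int ×ₗ Int) < toLex b)) := by
    funext a b
    rcases a with ⟨a1, a2⟩; rcases b with ⟨b1, b2⟩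
    rw [Bool.eq_iff_iff]
    simp only [Bool.or_eq_true, Bool.and_eq_true, Bool.not_eq_true', decide_eq_true_iff,
      decide_eq_false_iff_not, Prod.Lex.lt_iff, ofLex_toLex]
    omega
  simp only [PySem.List.sorted2, PySem.List.sorted, if_neg (by decide : ¬ (false = true))]
  rw [hbe]

-- on the sorted list, adjacent-dedup is dedup
theorem pvDestutter_sorted (xs : List (Int × Int)) :
    (PySem.List.sorted xs (fun p => (toLex p : Int ×ₗ Int)) false).destutter (· ≠ ·) =
      (PySem.List.sorted xs (fun p => (toLex p : Int ×ₗ Int)) false).dedup := by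
  haveI : Std.Antisymm (fun a b : Int × Int => (toLex a : Int ×ₗ Int) ≤ toLex b) :=
    ⟨fun a b h1 h2 => toLex.injective (le_antisymm h1 h2)⟩
  exact (PySem.List.sorted_pairwise xs (fun p => (toLex p : Int ×ₗ Int))).destutter_eq_dedup

theorem pvCountP_dedup_sorted (xs : List (Int × Int)) (f : Int × Int → Bool) :
    ((PySem.List.sorted xs (fun p => (toLex p : Int ×ₗ Int)) false).dedup).countP f =
      (PySem.Set.ofList xs).countP f := by
  refine List.Perm.countP_eq f ?_
  rw [List.perm_ext_iff_of_nodup (List.nodup_dedup _) (PySem.Set.nodup_ofList _)]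
  intro a
  simp [List.mem_dedup, PySem.List.mem_sorted, PySem.Set.mem_ofList]

-- the distinct pairs of level k are in bijection (via snd) with A's per-level id set
theorem pvCnt_set (l : List (Int × Int × Int)) (k : Int) (hk : 1 ≤ k ∧ k ≤ 4) :
    ((PySem.Set.ofList ((l.filter (fun item => decide (1 ≤ item.2.2) && decide (item.2.2 ≤ 4))).map
        (fun item => (item.2.2, item.2.1)))).countP (fun p => p.1 == k)) =
      (PySem.Set.ofList ((l.filter (fun item => item.2.2 == k)).map (fun item => item.2.1))).length := by
  set A := PySem.Set.ofList ((l.filter (fun item => decide (1 ≤ item.2.2) && decide (item.2.2 ≤ 4))).map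
      (fun item => (item.2.2, item.2.1))) with hA
  have hAnd : A.Nodup := PySem.Set.nodup_ofList _
  have hF : (A.filter (fun p => p.1 == k)).Nodup := hAnd.filter _
  have hmemF : ∀ p ∈ A.filter (fun p => p.1 == k), p.1 = k := by
    intro p hp
    simpa using (List.of_mem_filter hp)
  have hmapnd : ((A.filter (fun p => p.1 == k)).map Prod.snd).Nodup := by
    refine List.Nodup.map_on ?_ hF
    intro x hx y hy hxy
    exact Prod.ext (by rw [hmemF x hx, hmemF y hy]) hxy
  have hperm : ((A.filter (fun p => p.1 == k)).map Prod.snd).Perm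
      (PySem.Set.ofList ((l.filter (fun item => item.2.2 == k)).map (fun item => item.2.1))) := by
    rw [List.perm_ext_iff_of_nodup hmapnd (PySem.Set.nodup_ofList _)]
    intro x
    constructor
    · intro hx
      obtain ⟨p, hp, hps⟩ := List.mem_map.mp hx
      have hk' := hmemF p hp
      have hpA : p ∈ A := List.mem_of_mem_filter hp
      rw [hA, PySem.Set.mem_ofList] at hpA
      obtain ⟨it, hit, hits⟩ := List.mem_map.mp hpA
      have hitl : it ∈ l := List.mem_of_mem_filter hit
      have h1 : it.2.2 = k := by rw [← hk']; exact congrArg Prod.fst hits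
      have h2 : it.2.1 = x := by rw [← hps]; exact congrArg Prod.snd hits
      rw [PySem.Set.mem_ofList]
      exact List.mem_map.mpr ⟨it, List.mem_filter.mpr ⟨hitl, by simp [h1]⟩, h2⟩
    · intro hx
      rw [PySem.Set.mem_ofList] at hx
      obtain ⟨it, hit, hits⟩ := List.mem_map.mp hx
      have hitl : it ∈ l := List.mem_of_mem_filter hit
      have hitk : it.2.2 = k := by simpa using (List.of_mem_filter hit)
      refine List.mem_map.mpr ⟨(k, x), List.mem_filter.mpr ⟨?_, by simp⟩, rfl⟩
      rw [hA, PySem.Set.mem_ofList]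
      refine List.mem_map.mpr ⟨it, List.mem_filter.mpr ⟨hitl, ?_⟩, ?_⟩
      · simp only [Bool.and_eq_true, decide_eq_true_iff]; omega
      · rw [hitk, hits]
  calc A.countP (fun p => p.1 == k) = (A.filter (fun p => p.1 == k)).length := by
        rw [List.countP_eq_length_filter]
    _ = ((A.filter (fun p => p.1 == k)).map Prod.snd).length := (List.length_map _).symm
    _ = _ := hperm.length_eq

-- the scan's final counters are exactly A's four distinct-id counts
theorem pvAltCounts (l : List (Int × Int × Int)) :
    ((PySem.List.sorted2
        ((l.filter (fun item => decide (1 ≤ item.2.2) && decide (item.2.2 ≤ 4))).map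
          (fun item => (item.2.2, item.2.1)))
        Prod.fst Prod.snd).foldl pvScanStep (none, (0, 0, 0, 0))).2 =
      (PySem.Set.len (PySem.Set.ofList ((l.filter (fun item => item.2.2 == 1)).map (fun item => item.2.1))),
       PySem.Set.len (PySem.Set.ofList ((l.filter (fun item => item.2.2 == 2)).map (fun item => item.2.1))),
       PySem.Set.len (PySem.Set.ofList ((l.filter (fun item => item.2.2 == 3)).map (fun item => item.2.1))),
       PySem.Set.len (PySem.Set.ofList ((l.filter (fun item => item.2.2 == 4)).map (fun item => item.2.1)))) := by
  rw [pvSorted2_eq_sorted_toLex, pvScan_none, pvDestutter_sorted]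
  simp only [pvAddCnt, pvCnt, pvCountP_dedup_sorted, zero_add, PySem.Set.len]
  rw [pvCnt_set l 1 (by omega), pvCnt_set l 2 (by omega), pvCnt_set l 3 (by omega),
    pvCnt_set l 4 (by omega)]

-- ===== VERDICT (by name: the statement is the Claim_ definition above) =====
theorem evaluate_env_security_level_spec : Claim_equal_evaluate_env_security_level := by
  intro l _
  show evaluate_env_security_level l = evaluate_env_security_level_alt l
  unfold evaluate_env_security_level evaluate_env_security_level_alt
  simp only [pvAltCounts]
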